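-- pv_equiv track=rewrite | github.com/joeblack2k/wiiu-usb-rocket | core/services/download_service.py | _split_ranges
-- ===== SOURCE A (Python) =====
-- def _split_ranges(total_size: int, parts: int) -> list[tuple[int, int]]:
--     if total_size <= 0:
--         return []
--     parts = max(1, parts)
--     base = total_size // parts
--     extra = total_size % parts
--     ranges: list[tuple[int, int]] = []
--     offset = 0
--     for index in range(parts):
--         span = base + (1 if index < extra else 0)
--         if span <= 0:
--             continue
--         start = offset
--         end = start + span - 1
--         ranges.append((start, end))
--         offset = end + 1
--     return ranges
-- ===== SOURCE B (Python) =====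
-- def _split_ranges(total_size: int, parts: int) -> list[tuple[int, int]]:
--     if total_size <= 0:
--         return []
--     parts = max(1, parts)
--     base = total_size // parts
--     extra = total_size % parts
--     k = min(parts, total_size)
--
--     def rng(i: int) -> tuple[int, int]:
--         start = i * base + min(i, extra)
--         return (start, start + base + (1 if i < extra else 0) - 1)
--
--     return [rng(i) for i in range(k)]
-- ===== Notes on version B (the rewrite author's own statement) =====
-- stated objective: alternative
-- what changed: Each range's start is computed by the closed form i*base + min(i, extra) instead of threading a running offset, the span<=0 skip branch disappears, and the loop runs only min(parts, total_size) iterations instead of parts.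
import Mathlib
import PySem

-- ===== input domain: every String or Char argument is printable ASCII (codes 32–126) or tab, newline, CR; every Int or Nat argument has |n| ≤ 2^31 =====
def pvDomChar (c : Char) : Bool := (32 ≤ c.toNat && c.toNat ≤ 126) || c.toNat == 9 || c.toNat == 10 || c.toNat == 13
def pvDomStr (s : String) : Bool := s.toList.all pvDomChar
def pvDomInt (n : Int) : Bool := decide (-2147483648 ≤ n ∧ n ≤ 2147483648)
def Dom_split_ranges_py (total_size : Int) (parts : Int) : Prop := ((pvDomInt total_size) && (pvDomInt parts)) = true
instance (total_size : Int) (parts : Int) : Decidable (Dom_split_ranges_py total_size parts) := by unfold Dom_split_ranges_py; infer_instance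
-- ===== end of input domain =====

-- B replaces A's running-offset accumulator by the closed form start = i*base + min(i, extra)
-- and loops only over the min(parts, total_size) nonempty ranges (no skip branch); alternative decomposition.

-- ===== PORT A =====
def split_ranges_py (total_size : Int) (parts : Int) : List (Int × Int) :=
  if total_size ≤ 0 then []
  else
    let parts2 := max 1 parts
    let base := PySem.Int.floordiv total_size parts2
    let extra := PySem.Int.mod total_size parts2
    ((PySem.List.pyRange 0 parts2 1).foldl
      (fun (st : List (Int × Int) × Int) (index : Int) =>
        let span := base + (if index < extra then (1 : Int) else 0)
        if span ≤ 0 then st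
        else
          let start := st.2
          let e := start + span - 1
          (st.1 ++ [(start, e)], e + 1))
      ([], 0)).1

-- ===== PORT B =====
def split_ranges_py_alt (total_size : Int) (parts : Int) : List (Int × Int) :=
  if total_size ≤ 0 then []
  else
    let p := max 1 parts
    let base := PySem.Int.floordiv total_size p
    let extra := PySem.Int.mod total_size p
    (PySem.List.pyRange 0 (min p total_size) 1).map
      (fun i =>
        let start := i * base + min i extra
        (start, start + base + (if i < extra then (1 : Int) else 0) - 1))

-- ===== PRECONDITION & SPEC =====
def Spec_split_ranges_py (total_size : Int) (parts : Int) (out : List (Int × Int)) : Prop := out = split_ranges_py_alt total_size parts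
instance (total_size : Int) (parts : Int) (out : List (Int × Int)) : Decidable (Spec_split_ranges_py total_size parts out) := by unfold Spec_split_ranges_py; infer_instance

-- ===== CLAIM (what is proved, stated in full; the proofs are below) =====
def Claim_equal_split_ranges_py : Prop := ∀ (total_size : Int) (parts : Int), Dom_split_ranges_py total_size parts → Spec_split_ranges_py total_size parts (split_ranges_py total_size parts)

-- ===== LEMMAS AND PROOFS =====

-- Loop invariant: after the first n iterations of A's loop, the accumulated list is B's map
-- over the indices appended so far and the running offset equals n*base + min n extra.
lemma split_loop_eq (base extra : Int) (hb : 0 ≤ base) (he : 0 ≤ extra) (n : Nat) :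
    (PySem.List.pyRange 0 (n : Int) 1).foldl
      (fun (st : List (Int × Int) × Int) (index : Int) =>
        let span := base + (if index < extra then (1 : Int) else 0)
        if span ≤ 0 then st
        else
          let start := st.2
          let e := start + span - 1
          (st.1 ++ [(start, e)], e + 1))
      ([], 0)
    = ((PySem.List.pyRange 0 (if 0 < base then (n : Int) else min (n : Int) extra) 1).map
        (fun i =>
          let start := i * base + min i extra
          (start, start + base + (if i < extra then (1 : Int) else 0) - 1)),
       (n : Int) * base + min (n : Int) extra) := by
  induction n with
  | zero =>
      simp [PySem.List.pyRange_one_eq_nil, min_eq_left he]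
  | succ n ih =>
      rw [show ((n + 1 : Nat) : Int) = (n : Int) + 1 by push_cast; ring,
          PySem.List.pyRange_one_succ_right (by positivity), List.foldl_append, ih]
      simp only [List.foldl_cons, List.foldl_nil]
      by_cases hspan : base + (if (n : Int) < extra then (1 : Int) else 0) ≤ 0
      · -- skipped iteration: base = 0 and extra ≤ n, nothing changes
        have hb0 : base = 0 := by split_ifs at hspan <;> omega
        have hex : extra ≤ (n : Int) := by
          rcases lt_or_ge (n : Int) extra with h | h
          · rw [if_pos h] at hspan; omega
          · exact h
        rw [if_pos hspan, hb0]
        rw [if_neg (lt_irrefl (0 : Int)), if_neg (lt_irrefl (0 : Int))]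
        have h1 : min ((n : Int) + 1) extra = min (n : Int) extra := by omega
        rw [h1]
        simp
      · -- appended iteration
        rw [if_neg hspan]
        have hpos : 0 < base + (if (n : Int) < extra then (1 : Int) else 0) := by omega
        have hok : 0 < base ∨ (n : Int) < extra := by
          rcases lt_or_ge (n : Int) extra with h | h
          · exact Or.inr h
          · rw [if_neg (by omega)] at hpos; exact Or.inl (by omega)
        have hcnt : (if 0 < base then (n : Int) else min (n : Int) extra) = (n : Int) := by
          split_ifs with h1
          · rfl
          · rcases hok with h | h
            · omega
            · omega
        have hcnt1 : (if 0 < base then (n : Int) + 1 else min ((n : Int) + 1) extra) = (n : Int) + 1 := by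
          split_ifs with h1
          · rfl
          · rcases hok with h | h
            · omega
            · omega
        rw [hcnt, hcnt1, PySem.List.pyRange_one_succ_right (by positivity), List.map_append]
        have hnb : ((n : Int) + 1) * base = (n : Int) * base + base := by ring
        refine Prod.ext ?_ ?_
        · simp only [List.map_cons, List.map_nil]
          congr 2
          refine Prod.ext rfl ?_
          split_ifs with h <;> ring
        · simp only []
          rw [hnb]
          generalize (n : Int) * base = q
          split_ifs with h <;> omega

-- ===== VERDICT (by name: the statement is the Claim_ definition above) =====
theorem split_ranges_py_spec : Claim_equal_split_ranges_py := by
  intro total_size parts _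
  unfold Spec_split_ranges_py split_ranges_py split_ranges_py_alt
  by_cases ht : total_size ≤ 0
  · simp [ht]
  · simp only [if_neg ht]
    set p := max 1 parts with hp
    have hp1 : (1 : Int) ≤ p := le_max_left _ _
    set base := PySem.Int.floordiv total_size p with hbase
    set extra := PySem.Int.mod total_size p with hextra
    have hppos : 0 < p := by omega
    have he0 : 0 ≤ extra := PySem.Int.mod_nonneg total_size hppos
    have helt : extra < p := PySem.Int.mod_lt total_size hppos
    have hsum : base * p + extra = total_size := PySem.Int.floordiv_mul_add_mod total_size p
    have hb0 : 0 ≤ base := by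
      by_contra h
      have : base ≤ -1 := by omega
      nlinarith
    obtain ⟨m, hm⟩ : ∃ m : Nat, (m : Int) = p := ⟨p.toNat, by omega⟩
    rw [← hm, split_loop_eq base extra hb0 he0 m, hm]
    have hkey : (if 0 < base then p else min p extra) = min p total_size := by
      split_ifs with h
      · have hle : p ≤ total_size := by nlinarith
        omega
      · have hb00 : base = 0 := by omega
        rw [hb00, zero_mul, zero_add] at hsum
        omega
    rw [hkey]
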